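-- pv_equiv track=rewrite | github.com/jinho-waah/Practice | 프로그래머스/1/140108. 문자열 나누기/문자열 나누기.py | solution
-- ===== SOURCE A (Python) =====
-- def solution(s):
--     answer = 0
--     i = 0
--
--     while i < len(s):
--         x = s[i]  # 첫 글자
--         same_count = 1  # 첫 글자 등장 횟수
--         diff_count = 0  # 첫 글자가 아닌 다른 글자 등장 횟수
--
--         # x와 x가 아닌 글자의 등장 횟수가 같아질 때까지 계속 확인
--         for j in range(i + 1, len(s)):
--             if s[j] == x:
--                 same_count += 1
--             else:
--                 diff_count += 1
--
--             if same_count == diff_count: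
--                 i = j + 1  # 분리된 부분 다음 문자부터 시작
--                 break
--         else:
--             # 두 카운트가 같아지지 않으면 남은 문자열을 한 번에 분리
--             i = len(s)
--
--         # 새로운 부분 문자열이 만들어졌으므로 answer을 증가
--         answer += 1
--
--     return answer
-- ===== SOURCE B (Python) =====
-- def solution(s):
--     answer = 0
--     bal = 0
--     x = ''
--     for c in s:
--         if bal == 0:
--             x = c
--             answer += 1
--         bal += 1 if c == x else -1
--     return answer
-- ===== Notes on version B (the rewrite author's own statement) =====
-- stated objective: idiomatic
-- what changed: Replaces the index-driven outer while loop with a restarting inner for/else scan by one flat pass over the characters that keeps a running balance (same-minus-diff) and opens a new segment whenever the balance is zero.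
import Mathlib
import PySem

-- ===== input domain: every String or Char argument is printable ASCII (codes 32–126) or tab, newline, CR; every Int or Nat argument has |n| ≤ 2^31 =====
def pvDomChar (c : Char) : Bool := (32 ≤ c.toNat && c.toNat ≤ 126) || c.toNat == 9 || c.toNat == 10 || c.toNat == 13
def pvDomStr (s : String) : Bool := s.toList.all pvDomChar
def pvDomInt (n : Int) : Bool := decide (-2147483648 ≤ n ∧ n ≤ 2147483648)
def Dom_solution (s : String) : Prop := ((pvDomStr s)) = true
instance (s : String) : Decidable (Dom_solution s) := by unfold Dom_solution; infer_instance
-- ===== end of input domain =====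

-- B replaces A's nested while/for-else over indices by one flat pass keeping a running
-- balance; same result, stated and proved below (objective: idiomatic).

-- ===== PORT A =====
-- inner for-loop of A: scan from position i+1 updating same_count/diff_count; on
-- same_count == diff_count break and return the remaining suffix (i = j + 1);
-- if the loop completes, i = len(s), i.e. the remainder is [].
def solInner (x : Char) : List Char → Int → Int → List Char
  | [], _, _ => []
  | c :: rest, same, diff =>
    let same' := if c = x then same + 1 else same
    let diff' := if c = x then diff else diff + 1
    if same' = diff' then rest else solInner x rest same' diff'

theorem solInner_length (x : Char) (l : List Char) (same diff : Int) :
    (solInner x l same diff).length ≤ l.length := by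
  induction l generalizing same diff with
  | nil => simp [solInner]
  | cons c rest ih =>
    simp only [solInner]
    split <;> split
    · simp
    · exact Nat.le_trans (ih _ _) (Nat.le_succ _)
    · simp
    · exact Nat.le_trans (ih _ _) (Nat.le_succ _)

-- outer while-loop of A: take the first char x of the remainder, run the inner scan
-- with same_count = 1, diff_count = 0, count one segment, continue on the suffix.
def solOuter : List Char → Int
  | [] => 0
  | c :: rest => solOuter (solInner c rest 1 0) + 1
termination_by l => l.length
decreasing_by exact Nat.lt_succ_of_le (solInner_length _ _ _ _)

def solution (s : String) : Int := solOuter s.toList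

-- ===== PORT B =====
-- flat loop of Source B over the characters: state (answer, bal, x).
def solLoop : List Char → Int → Int → Char → Int
  | [], ans, _, _ => ans
  | c :: rest, ans, bal, x =>
    let ans' := if bal = 0 then ans + 1 else ans
    let x' := if bal = 0 then c else x
    let bal' := if c = x' then bal + 1 else bal - 1
    solLoop rest ans' bal' x'

def solution_alt (s : String) : Int := solLoop s.toList 0 0 ' '

-- ===== PRECONDITION & SPEC =====
def Spec_solution (s : String) (out : Int) : Prop := out = solution_alt s
instance (s : String) (out : Int) : Decidable (Spec_solution s out) := by unfold Spec_solution; infer_instance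

-- ===== CLAIM (what is proved, stated in full; the proofs are below) =====
def Claim_equal_solution : Prop := ∀ (s : String), Dom_solution s → Spec_solution s (solution s)

-- ===== LEMMAS AND PROOFS =====

-- While the balance is positive, B's loop tracks A's inner scan: it reaches the same
-- break point (balance zero) with the same remaining suffix.
theorem solLoop_inner (x : Char) (l : List Char) (same diff ans : Int)
    (h : diff < same) :
    solLoop l ans (same - diff) x = solLoop (solInner x l same diff) ans 0 x := by
  induction l generalizing same diff with
  | nil => simp [solLoop, solInner]
  | cons c rest ih =>
    by_cases hc : c = x
    · have hne : same - diff ≠ 0 := by omega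
      have hne2 : ¬ (same + 1 = diff) := by omega
      simp only [solLoop, solInner, hc, ite_true, if_neg hne, if_neg hne2]
      have hb1 : same - diff + 1 = same + 1 - diff := by ring
      rw [hb1]
      exact ih (same + 1) diff (by omega)
    · have hne : same - diff ≠ 0 := by omega
      simp only [solLoop, solInner, if_neg hc, if_neg hne]
      by_cases hb : same = diff + 1
      · simp only [if_pos hb]
        have hb0 : same - diff - 1 = (0 : Int) := by omega
        rw [hb0]
      · simp only [if_neg hb]
        have hb1 : same - diff - 1 = same - (diff + 1) := by ring
        rw [hb1]
        exact ih same (diff + 1) (by omega)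

-- Full correspondence: B's loop started at balance zero computes A's outer loop plus
-- the accumulated answer.
theorem solLoop_outer (l : List Char) (ans : Int) (x : Char) :
    solLoop l ans 0 x = solOuter l + ans := by
  induction l using solOuter.induct generalizing ans x with
  | case1 => simp [solLoop, solOuter]
  | case2 c rest ih =>
    simp only [solLoop, solOuter, ite_true]
    have h1 : (0 : Int) + 1 = 1 - 0 := by ring
    rw [h1, solLoop_inner c rest 1 0 (ans + 1) (by omega), ih]
    ring

-- ===== VERDICT (by name: the statement is the Claim_ definition above) =====
theorem solution_spec : Claim_equal_solution := by
  intro s _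
  unfold Spec_solution solution solution_alt
  rw [solLoop_outer]
  ring
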